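-- pv_equiv track=rewrite | github.com/yattew/project-euler | 30_digit_fifth_powers.py | selections
-- ===== SOURCE A (Python) =====
-- from copy import deepcopy
--
-- def selections(l):
--     if len(l) == 2:
--         return []
--     res = []
--     for i in range(len(l)):
--         item = l.pop(i)
--         l_new = deepcopy(l)
--         res.append(l_new)
--         rest_s = selections(l_new)
--         res.extend(rest_s)
--         l.insert(i, item)
--     return res
-- ===== SOURCE B (Python) =====
-- def selections(l):
--     if len(l) == 2:
--         return []
--     res = []
--     stack = [l[:i] + l[i + 1:] for i in range(len(l) - 1, -1, -1)]
--     while stack: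
--         node = stack.pop()
--         res.append(node)
--         if len(node) != 2:
--             stack.extend(node[:i] + node[i + 1:] for i in range(len(node) - 1, -1, -1))
--     return res
-- ===== Notes on version B (the rewrite author's own statement) =====
-- stated objective: alternative
-- what changed: Replaces A's recursion with its deepcopy and pop/insert mutation by an explicit stack-driven pre-order traversal that builds each child list by slicing, emitting the same sequence iteratively.
import Mathlib
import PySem

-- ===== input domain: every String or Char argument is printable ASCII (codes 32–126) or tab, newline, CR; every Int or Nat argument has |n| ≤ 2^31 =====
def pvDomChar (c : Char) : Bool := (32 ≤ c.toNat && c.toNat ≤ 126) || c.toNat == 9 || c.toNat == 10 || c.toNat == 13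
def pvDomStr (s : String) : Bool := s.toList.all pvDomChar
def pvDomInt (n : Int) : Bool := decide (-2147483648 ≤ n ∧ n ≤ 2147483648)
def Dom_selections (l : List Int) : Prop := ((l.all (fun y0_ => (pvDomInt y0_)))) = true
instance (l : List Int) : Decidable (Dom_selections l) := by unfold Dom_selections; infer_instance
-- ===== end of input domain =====

-- B replaces A's recursion (with its deepcopy and pop/insert mutation) by an explicit
-- stack-based pre-order traversal building each child by slicing; same return value, no mutation.

-- ===== PORT A =====
-- A pops index i (valid since i < len l), copies the remainder, recurses, reinserts;
-- the list after pop(i) is exactly l.eraseIdx i, so each loop step contributes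
-- l_new followed by selections l_new; res accumulates these in index order.
def selections (l : List Int) : List (List Int) :=
  if l.length = 2 then []
  else
    (List.range l.length).attach.flatMap (fun i =>
      let lnew := l.eraseIdx i.1
      lnew :: selections lnew)
termination_by l.length
decreasing_by
  have hi : i.1 < l.length := List.mem_range.mp i.2
  simp [List.length_eraseIdx, hi]
  omega

-- ===== PORT B =====
-- node[:i] + node[i+1:] for i in range(len node), in index order
def selKids (n : List Int) : List (List Int) :=
  (List.range n.length).map (fun i => n.take i ++ n.drop (i + 1))

-- termination weight for the stack loop
def selWgt : Nat → Nat
  | 0 => 1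
  | n + 1 => (n + 1) * selWgt n + 1

theorem selWgt_pos (n : Nat) : 0 < selWgt n := by
  cases n <;> simp [selWgt]

theorem selKids_wgt_lt (c : List Int) :
    (((if c.length = 2 then [] else selKids c)).map (fun n => selWgt n.length)).sum
      < selWgt c.length := by
  split
  · simpa using selWgt_pos c.length
  · cases hl : c.length with
    | zero => simp [selKids, hl, selWgt]
    | succ m =>
        have : ∀ i ∈ List.range c.length,
            selWgt (c.take i ++ c.drop (i + 1)).length = selWgt m := by
          intro i hi
          have hi' : i < c.length := List.mem_range.mp hi
          have : (c.take i ++ c.drop (i + 1)).length = m := by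
            simp [List.length_append, List.length_take, List.length_drop]
            omega
          rw [this]
        simp only [selKids, List.map_map]
        rw [List.map_congr_left (by intro i hi; exact this i hi)]
        simp [hl, selWgt]

-- Python B pops from the end of the stack and pushes children in reversed index
-- order; with the list head as stack top this is exactly: pop the head, prepend
-- the children in index order.
def selLoop (stack : List (List Int)) : List (List Int) :=
  match stack with
  | [] => []
  | c :: rest => c :: selLoop ((if c.length = 2 then [] else selKids c) ++ rest)
termination_by (stack.map (fun n => selWgt n.length)).sum
decreasing_by
  simp only [List.map_append, List.sum_append, List.map_cons, List.sum_cons]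
  have h1 := selKids_wgt_lt c
  have h2 : (List.map (fun n => selWgt n.length)
        (if _ : c.length = 2 then ([] : List (List Int)) else selKids c)).sum ≤
      (List.map (fun n => selWgt n.length)
        (if c.length = 2 then ([] : List (List Int)) else selKids c)).sum := by
    by_cases h : c.length = 2 <;> simp [h]
  omega

def selections_alt (l : List Int) : List (List Int) :=
  if l.length = 2 then [] else selLoop (selKids l)

-- ===== PRECONDITION & SPEC =====
def Spec_selections (l : List Int) (out : List (List Int)) : Prop := out = selections_alt l
instance (l : List Int) (out : List (List Int)) : Decidable (Spec_selections l out) := by unfold Spec_selections; infer_instance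

-- ===== CLAIM (what is proved, stated in full; the proofs are below) =====
def Claim_equal_selections : Prop := ∀ (l : List Int), Dom_selections l → Spec_selections l (selections l)

-- ===== LEMMAS AND PROOFS =====

theorem selKids_eq_eraseIdx (n : List Int) :
    selKids n = (List.range n.length).map (fun i => n.eraseIdx i) := by
  unfold selKids
  apply List.map_congr_left
  intro i _
  exact (List.eraseIdx_eq_take_drop_succ n i).symm

theorem selections_eq_flatMap (l : List Int) :
    selections l =
      if l.length = 2 then []
      else (selKids l).flatMap (fun c => c :: selections c) := by
  rw [selections]
  split
  · rfl
  · rw [selKids_eq_eraseIdx, List.flatMap_map]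
    have h : List.range l.length = (List.range l.length).attach.map Subtype.val := by
      simp
    conv_rhs => rw [h, List.flatMap_map]

theorem selLoop_eq (s : List (List Int)) :
    selLoop s = s.flatMap (fun c => c :: selections c) := by
  fun_induction selLoop s with
  | case1 => rfl
  | case2 c rest ih =>
      simp only [dite_eq_ite] at ih
      rw [ih, List.flatMap_append, List.flatMap_cons]
      have : (if c.length = 2 then [] else selKids c).flatMap
          (fun c => c :: selections c) = selections c := by
        rw [selections_eq_flatMap c]
        split <;> simp
      rw [this]
      simp

-- ===== VERDICT (by name: the statement is the Claim_ definition above) =====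
theorem selections_spec : Claim_equal_selections := by
  intro l _
  unfold Spec_selections selections_alt
  rw [selections_eq_flatMap]
  split
  · rfl
  · exact (selLoop_eq _).symm
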